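-- pv_equiv track=rewrite | github.com/DTW-Thalion/MPEG-O | python/src/ttio/codecs/name_tokenizer.py | _select_mode
-- ===== SOURCE A (Python) =====
-- MODE_COLUMNAR: int = 0x00
--
-- MODE_VERBATIM: int = 0x01
--
-- _TYPE_NUMERIC: int = 0
--
-- _TYPE_STRING: int = 1
--
-- def _select_mode(
--     tokenised: list[list[tuple[str, object]]],
-- ) -> tuple[int, list[int] | None]:
--     """Decide columnar vs verbatim and return (mode, type_table).
--
--     Returns (MODE_COLUMNAR, [type, ...]) when all reads share the
--     same token count AND per-column token type. Empty input list →
--     (MODE_COLUMNAR, []) per HANDOFF.md §3.3 / gotcha §111. Otherwise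
--     returns (MODE_VERBATIM, None).
--     """
--     if not tokenised:
--         return MODE_COLUMNAR, []
--
--     first_count = len(tokenised[0])
--     for tokens in tokenised[1:]:
--         if len(tokens) != first_count:
--             return MODE_VERBATIM, None
--
--     # All reads have the same column count. Check per-column types.
--     type_table = [
--         _TYPE_NUMERIC if t == "num" else _TYPE_STRING
--         for (t, _v) in tokenised[0]
--     ]
--     for tokens in tokenised[1:]:
--         for col_idx, (t, _v) in enumerate(tokens):
--             expected = _TYPE_NUMERIC if t == "num" else _TYPE_STRING
--             if expected != type_table[col_idx]:
--                 return MODE_VERBATIM, None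
--
--     return MODE_COLUMNAR, type_table
-- ===== SOURCE B (Python) =====
-- MODE_COLUMNAR: int = 0x00
-- MODE_VERBATIM: int = 0x01
-- _TYPE_NUMERIC: int = 0
-- _TYPE_STRING: int = 1
--
--
-- def _select_mode(tokenised):
--     """Column-major scan: one set of row widths, then per column a set of
--     token kinds; columnar iff every such set is a singleton."""
--     if not tokenised:
--         return MODE_COLUMNAR, []
--     if len({len(row) for row in tokenised}) != 1:
--         return MODE_VERBATIM, None
--     table = []
--     for j in range(len(tokenised[0])):
--         kinds = {row[j][0] == "num" for row in tokenised}
--         if len(kinds) != 1: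
--             return MODE_VERBATIM, None
--         table.append(_TYPE_NUMERIC if True in kinds else _TYPE_STRING)
--     return MODE_COLUMNAR, table
-- ===== Notes on version B (the rewrite author's own statement) =====
-- stated objective: alternative
-- what changed: Replaces A's row-major passes (length loop, then nested per-row/per-column comparison against a precomputed type table) by a column-major scan driven by set cardinality: one set of row widths must be a singleton, then for each column index the set of token kinds across all rows must be a singleton, and the table is built column by column from those singleton sets.
import Mathlib
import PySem

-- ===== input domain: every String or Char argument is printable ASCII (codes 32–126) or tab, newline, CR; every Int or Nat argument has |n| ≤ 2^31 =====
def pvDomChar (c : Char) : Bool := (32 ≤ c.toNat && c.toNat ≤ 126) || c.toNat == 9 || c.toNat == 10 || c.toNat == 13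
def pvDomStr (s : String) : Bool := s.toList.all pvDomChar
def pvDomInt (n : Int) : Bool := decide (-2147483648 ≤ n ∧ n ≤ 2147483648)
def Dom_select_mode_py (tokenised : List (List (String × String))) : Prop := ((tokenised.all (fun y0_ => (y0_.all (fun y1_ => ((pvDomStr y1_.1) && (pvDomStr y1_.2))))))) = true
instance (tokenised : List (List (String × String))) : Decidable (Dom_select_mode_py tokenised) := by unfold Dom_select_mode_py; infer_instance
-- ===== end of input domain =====

-- B replaces A's row-major comparison against the first row by a column-major scan
-- using set cardinality (singleton width set, then a singleton kind set per column).

-- ===== PORT A =====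
def select_mode_py (tokenised : List (List (String × String))) : Int × Option (List Int) :=
  match tokenised with
  | [] => (0, some [])
  | first :: rest =>
    let first_count := first.length
    -- for tokens in tokenised[1:]: early return on length mismatch
    if rest.any (fun tokens => decide (tokens.length ≠ first_count)) then (1, none)
    else
      let type_table := first.map (fun tv => if tv.1 == "num" then (0 : Int) else 1)
      -- nested loop with enumerate; type_table[col_idx] is always in range here,
      -- so pyGetD's default 0 is unreachable
      if rest.any (fun tokens => (PySem.List.enumerate tokens).any
           (fun ci => decide ((if ci.2.1 == "num" then (0 : Int) else 1)
                               ≠ PySem.List.pyGetD type_table ci.1 0)))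
      then (1, none)
      else (0, some type_table)

-- ===== PORT B =====
-- the body of B's 'for j in range(...)' loop (early return = the none state);
-- row[j] is always in range when this runs (the width set was a singleton),
-- so pyGetD's default is unreachable
def pvColStep (rows : List (List (String × String))) (acc : Option (List Int)) (j : Nat) :
    Option (List Int) :=
  match acc with
  | none => none
  | some tbl =>
    let kinds : PySem.Set Bool :=
      PySem.Set.ofList (rows.map (fun row => (PySem.List.pyGetD row (j : Int) ("", "")).1 == "num"))
    if kinds.length = 1 then
      some (tbl ++ [if PySem.Set.contains kinds true then (0 : Int) else 1])
    else none

def select_mode_py_alt (tokenised : List (List (String × String))) : Int × Option (List Int) :=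
  match tokenised with
  | [] => (0, some [])
  | first :: rest =>
    if (PySem.Set.ofList ((first :: rest).map (fun row => (row.length : Int)))).length = 1 then
      match (List.range first.length).foldl (pvColStep (first :: rest)) (some []) with
      | some tbl => (0, some tbl)
      | none => (1, none)
    else (1, none)

-- ===== PRECONDITION & SPEC =====
def Spec_select_mode_py (tokenised : List (List (String × String))) (out : Int × Option (List Int)) : Prop := out = select_mode_py_alt tokenised
instance (tokenised : List (List (String × String))) (out : Int × Option (List Int)) : Decidable (Spec_select_mode_py tokenised out) := by unfold Spec_select_mode_py; infer_instance

-- ===== CLAIM =====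
def Claim_equal_select_mode_py : Prop := ∀ (tokenised : List (List (String × String))), Dom_select_mode_py tokenised → Spec_select_mode_py tokenised (select_mode_py tokenised)

-- ===== LEMMAS AND PROOFS =====

-- a singleton-valued list makes a one-element set, and conversely
lemma pv_set_singleton {α : Type} [BEq α] [LawfulBEq α] (a : α) (l : List α)
    (h : ∀ x ∈ l, x = a) : PySem.Set.ofList (a :: l) = [a] := by
  rw [PySem.Set.ofList_cons]
  have : PySem.Set.discard (PySem.Set.ofList l) a = [] := by
    rw [List.eq_nil_iff_forall_not_mem]
    intro y hy
    rcases (PySem.Set.mem_discard _ _ _).mp hy with ⟨hyl, hne⟩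
    exact hne (h y ((PySem.Set.mem_ofList _ _).mp hyl))
  rw [this]

lemma pv_set_len_one {α : Type} [BEq α] [LawfulBEq α] (a : α) (l : List α)
    (h : (PySem.Set.ofList (a :: l)).length = 1) : ∀ x ∈ l, x = a := by
  rw [PySem.Set.ofList_cons] at h
  have hnil : PySem.Set.discard (PySem.Set.ofList l) a = [] := by
    cases hd : PySem.Set.discard (PySem.Set.ofList l) a with
    | nil => rfl
    | cons z zs => rw [hd] at h; simp at h
  intro x hx
  by_contra hne
  have : x ∈ PySem.Set.discard (PySem.Set.ofList l) a :=
    (PySem.Set.mem_discard _ _ _).mpr ⟨(PySem.Set.mem_ofList _ _).mpr hx, hne⟩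
  rw [hnil] at this
  exact absurd this (List.not_mem_nil)

-- the per-row type signature A computes
def pvSig (row : List (String × String)) : List Int :=
  row.map (fun tv => if tv.1 == "num" then (0 : Int) else 1)

-- the kind of row's j-th token, as B reads it
def pvKind (j : Nat) (row : List (String × String)) : Bool :=
  (PySem.List.pyGetD row (j : Int) ("", "")).1 == "num"

def pvKinds (rows : List (List (String × String))) (j : Nat) : PySem.Set Bool :=
  PySem.Set.ofList (rows.map (pvKind j))

lemma pv_colStep_eq (rows : List (List (String × String))) (tbl : List Int) (j : Nat) :
    pvColStep rows (some tbl) j =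
      (if (pvKinds rows j).length = 1 then
        some (tbl ++ [if PySem.Set.contains (pvKinds rows j) true then (0 : Int) else 1])
      else none) := rfl

-- a column's kind set is a singleton iff it is exactly [pvKind j first]
lemma pv_col_char (first : List (String × String)) (rest : List (List (String × String))) (j : Nat) :
    (pvKinds (first :: rest) j).length = 1 ↔
      pvKinds (first :: rest) j = [pvKind j first] := by
  constructor
  · intro h
    have := pv_set_len_one (pvKind j first) (rest.map (pvKind j)) (by simpa [pvKinds] using h)
    simpa [pvKinds] using pv_set_singleton (pvKind j first) (rest.map (pvKind j)) this
  · intro h; rw [h]; rfl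

-- when every column below n is uniform, B's fold appends each column's entry
lemma pv_fold_ok (rows : List (List (String × String))) (first : List (String × String)) (n : Nat)
    (hU : ∀ j < n, pvKinds rows j = [pvKind j first]) :
    ∀ tbl, (List.range n).foldl (pvColStep rows) (some tbl) =
      some (tbl ++ (List.range n).map (fun j => if pvKind j first then (0 : Int) else 1)) := by
  induction n with
  | zero => intro tbl; simp
  | succ n ih =>
    intro tbl
    rw [List.range_succ, List.foldl_append, List.map_append,
      ih (fun j hj => hU j (Nat.lt_succ_of_lt hj))]
    rw [List.foldl_cons, List.foldl_nil, pv_colStep_eq, hU n (Nat.lt_succ_self n)]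
    simp [PySem.Set.contains, List.append_assoc]

-- a non-uniform column below n drives B's fold to none
lemma pv_fold_none (rows : List (List (String × String))) (first : List (String × String))
    (hr : ∃ rest, rows = first :: rest) (n : Nat)
    (hbad : ∃ j < n, (pvKinds rows j).length ≠ 1) :
    (List.range n).foldl (pvColStep rows) (some []) = none := by
  induction n with
  | zero => obtain ⟨j, hj, _⟩ := hbad; omega
  | succ n ih =>
    rw [List.range_succ, List.foldl_append]
    by_cases hex : ∃ j < n, (pvKinds rows j).length ≠ 1
    · rw [ih hex]; rfl
    · push Not at hex
      obtain ⟨j, hj, hjbad⟩ := hbad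
      have hjn : j = n := by
        rcases Nat.lt_succ_iff_lt_or_eq.mp hj with h | h
        · exact absurd (hex j h) hjbad
        · exact h
      rw [hjn] at hjbad
      have hU : ∀ i < n, pvKinds rows i = [pvKind i first] := by
        intro i hi
        obtain ⟨rest, rfl⟩ := hr
        exact (pv_col_char first rest i).mp (hex i hi)
      rw [pv_fold_ok rows first n hU]
      rw [List.foldl_cons, List.foldl_nil, pv_colStep_eq, if_neg hjbad]

-- A's inner enumerate loop finds a mismatch iff the signatures differ (given equal lengths)
lemma pv_row_lemma (first row : List (String × String)) (h : row.length = first.length) :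
    (((PySem.List.enumerate row).any
      (fun ci => decide ((if ci.2.1 == "num" then (0 : Int) else 1)
                          ≠ PySem.List.pyGetD (pvSig first) ci.1 0))) = true)
      ↔ pvSig row ≠ pvSig first := by
  simp only [List.any_eq_true, PySem.List.mem_enumerate_iff, decide_eq_true_eq]
  constructor
  · rintro ⟨ci, ⟨k, hk, rfl⟩, hne⟩ heq
    apply hne
    have hk' : k < first.length := h ▸ hk
    have hk2 : k < (pvSig first).length := by simpa [pvSig] using hk'
    have := congrArg (fun l => l[k]?) heq
    simp only [zero_add, PySem.List.pyGetD_natCast, List.getD_eq_getElem (pvSig first) 0 hk2]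
    simp [pvSig, hk, hk'] at this ⊢
    exact this
  · intro hne
    by_contra hall
    rw [not_exists] at hall
    apply hne
    apply List.ext_getElem (by simp [pvSig, h])
    intro k hk1 hk2
    have hkr : k < row.length := by simpa [pvSig] using hk1
    have hkf : k < first.length := by simpa [pvSig] using hk2
    have h2 := hall ((0 : Int) + k, row[k])
    rw [not_and] at h2
    have := h2 ⟨k, hkr, rfl⟩
    simp only [not_not, zero_add, PySem.List.pyGetD_natCast,
      List.getD_eq_getElem (pvSig first) 0 hk2] at this
    simpa [pvSig, hkr, hkf] using this

-- given equal row lengths, per-column uniformity of kinds ≡ equality of signatures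
lemma pv_uniform_iff_sig (first row : List (String × String)) (h : row.length = first.length) :
    (∀ j < first.length, pvKind j row = pvKind j first) ↔ pvSig row = pvSig first := by
  constructor
  · intro hu
    apply List.ext_getElem (by simp [pvSig, h])
    intro k hk1 hk2
    have hkr : k < row.length := by simpa [pvSig] using hk1
    have hkf : k < first.length := by simpa [pvSig] using hk2
    have := hu k hkf
    simp only [pvKind, PySem.List.pyGetD_natCast] at this
    rw [List.getD_eq_getElem row _ hkr, List.getD_eq_getElem first _ hkf] at this
    by_cases hb : row[k].1 = "num" <;> by_cases hc : first[k].1 = "num" <;>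
      simp [pvSig, hb, hc] at this ⊢
  · intro hs j hj
    have hjr : j < row.length := h ▸ hj
    have := congrArg (fun l => l[j]?) hs
    simp only [pvSig, List.getElem?_map, List.getElem?_eq_getElem hjr,
      List.getElem?_eq_getElem hj, Option.map_some] at this
    simp only [pvKind, PySem.List.pyGetD_natCast,
      List.getD_eq_getElem row _ hjr, List.getD_eq_getElem first _ hj]
    by_cases hb : row[j].1 = "num" <;> by_cases hc : first[j].1 = "num" <;>
      simp [hb, hc] at this ⊢

theorem select_mode_py_spec : Claim_equal_select_mode_py := by
  intro tokenised _
  unfold Spec_select_mode_py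
  cases tokenised with
  | nil => rfl
  | cons first rest =>
    simp only [select_mode_py, select_mode_py_alt]
    by_cases hlen : ∀ row ∈ rest, row.length = first.length
    · -- all widths equal: A passes its first loop, B's width set is a singleton
      have hA1 : (rest.any (fun tokens => decide (tokens.length ≠ first.length))) = false := by
        simp only [List.any_eq_false, decide_eq_true_eq, not_not]
        exact hlen
      have hB1 : (PySem.Set.ofList ((first :: rest).map (fun row => (row.length : Int)))).length = 1 := by
        have : PySem.Set.ofList ((first :: rest).map (fun row => (row.length : Int)))
            = [(first.length : Int)] := by
          simp only [List.map_cons]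
          exact pv_set_singleton _ _ (by
            intro x hx
            obtain ⟨row, hrow, rfl⟩ := List.mem_map.mp hx
            exact congrArg (fun n => ((n : Nat) : Int)) (hlen row hrow))
        rw [this]
        rfl
      rw [hA1, if_pos hB1]
      by_cases hsig : ∀ row ∈ rest, pvSig row = pvSig first
      · -- uniform: both return (0, some (pvSig first))
        have hA2 : (rest.any (fun tokens => (PySem.List.enumerate tokens).any
            (fun ci => decide ((if ci.2.1 == "num" then (0 : Int) else 1)
                                ≠ PySem.List.pyGetD (first.map (fun tv => if tv.1 == "num" then (0 : Int) else 1)) ci.1 0)))) = false := by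
          simp only [List.any_eq_false]
          intro row hrow hbad
          exact (pv_row_lemma first row (hlen row hrow)).mp hbad (hsig row hrow)
        have hU : ∀ j < first.length, pvKinds (first :: rest) j = [pvKind j first] := by
          intro j hj
          apply (pv_col_char first rest j).mp
          apply (pv_col_char first rest j).mpr
          apply pv_set_singleton
          intro x hx
          obtain ⟨row, hrow, rfl⟩ := List.mem_map.mp hx
          exact (pv_uniform_iff_sig first row (hlen row hrow)).mpr (hsig row hrow) j hj
        have htbl : (List.range first.length).map
            (fun j => if pvKind j first then (0 : Int) else 1) = pvSig first := by
          apply List.ext_getElem (by simp [pvSig])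
          intro k hk1 hk2
          have hkf : k < first.length := by simpa using hk1
          simp only [List.getElem_map, List.getElem_range, pvKind,
            PySem.List.pyGetD_natCast, List.getD_eq_getElem first _ hkf]
          simp [pvSig]
        rw [pv_fold_ok (first :: rest) first first.length hU []]
        simp only [pvSig] at htbl
        rw [hA2, List.nil_append, htbl]
        rfl
      · -- some signature differs: both return (1, none)
        push Not at hsig
        obtain ⟨row, hrow, hne⟩ := hsig
        have hA2 : (rest.any (fun tokens => (PySem.List.enumerate tokens).any
            (fun ci => decide ((if ci.2.1 == "num" then (0 : Int) else 1)
                                ≠ PySem.List.pyGetD (first.map (fun tv => if tv.1 == "num" then (0 : Int) else 1)) ci.1 0)))) = true :=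
          List.any_eq_true.mpr ⟨row, hrow, (pv_row_lemma first row (hlen row hrow)).mpr hne⟩
        rw [hA2]
        have hj : ∃ j < first.length, pvKind j row ≠ pvKind j first := by
          by_contra hall
          push Not at hall
          exact hne ((pv_uniform_iff_sig first row (hlen row hrow)).mp hall)
        obtain ⟨j, hjlt, hjne⟩ := hj
        have hbad : (pvKinds (first :: rest) j).length ≠ 1 := by
          intro h1
          have := pv_set_len_one (pvKind j first) (rest.map (pvKind j))
            (by simpa [pvKinds] using h1) (pvKind j row) (List.mem_map_of_mem hrow)
          exact hjne this
        rw [pv_fold_none (first :: rest) first ⟨rest, rfl⟩ first.length ⟨j, hjlt, hbad⟩]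
        rfl
    · -- a width differs: both return (1, none)
      push Not at hlen
      obtain ⟨row, hrow, hne⟩ := hlen
      have hA1 : (rest.any (fun tokens => decide (tokens.length ≠ first.length))) = true :=
        List.any_eq_true.mpr ⟨row, hrow, decide_eq_true hne⟩
      have hB1 : (PySem.Set.ofList ((first :: rest).map (fun row => (row.length : Int)))).length ≠ 1 := by
        intro h1
        simp only [List.map_cons] at h1
        have := pv_set_len_one ((first.length : Int)) (rest.map (fun row => (row.length : Int)))
          h1 ((row.length : Int)) (List.mem_map_of_mem hrow)
        exact hne (by exact_mod_cast this)
      rw [hA1, if_neg hB1]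
      rfl
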